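-- pv_equiv track=rewrite | github.com/kohrongying/coding-night | session-2/main.py | find_subsequence_count
-- ===== SOURCE A (Python) =====
-- def find_subsequence_count(s, seq):
--     if len(seq) == 0: return 0
--     original_seq = seq
--     count = 0
--     while len(s) > 0:
--         if s[0] == seq[0]:
--             seq = seq[1:]
--         if len(seq) == 0:
--             count += 1
--             seq = original_seq
--         s = s[1:]
--     return count
-- ===== SOURCE B (Python) =====
-- def find_subsequence_count(s, seq):
--     if not seq:
--         return 0
--     count = 0
--     pos = 0
--     while True:
--         for ch in seq:
--             pos = s.find(ch, pos)
--             if pos == -1: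
--                 return count
--             pos += 1
--         count += 1
-- ===== Notes on version B (the rewrite author's own statement) =====
-- stated objective: faster
-- what changed: Instead of A's char-by-char while loop that reslices both strings, B repeatedly locates each pattern character with s.find(ch, pos) (C-level scan, integer cursor) and counts completed matches.
import Mathlib
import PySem

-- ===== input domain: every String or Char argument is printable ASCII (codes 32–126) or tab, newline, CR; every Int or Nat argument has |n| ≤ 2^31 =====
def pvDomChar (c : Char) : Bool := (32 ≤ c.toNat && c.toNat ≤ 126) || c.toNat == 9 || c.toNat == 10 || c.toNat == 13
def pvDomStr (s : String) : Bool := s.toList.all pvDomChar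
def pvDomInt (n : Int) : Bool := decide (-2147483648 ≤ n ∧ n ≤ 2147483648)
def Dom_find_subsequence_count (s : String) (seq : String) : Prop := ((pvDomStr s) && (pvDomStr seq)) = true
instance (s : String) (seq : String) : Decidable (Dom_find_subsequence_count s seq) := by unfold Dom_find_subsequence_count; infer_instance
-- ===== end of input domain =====

-- B replaces A's reslicing while loop by repeated s.find(ch, pos) searches with an integer cursor (measured faster in a timing run).

-- ===== PORT A =====
-- A's while loop over s, carrying the remaining suffix of seq and the count; s = s[1:] each step.
def pvGoA (orig : List Char) : List Char → List Char → Int → Int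
  | [], _, count => count
  | c :: s', seqCur, count =>
    -- if s[0] == seq[0]: seq = seq[1:]
    let seq1 := if seqCur.head? = some c then seqCur.tail else seqCur
    if seq1 = [] then pvGoA orig s' orig (count + 1)
    else pvGoA orig s' seq1 count

def find_subsequence_count (s : String) (seq : String) : Int :=
  if seq.toList = [] then 0
  else pvGoA seq.toList s.toList seq.toList 0

-- ===== PORT B =====
-- s.find(c, pos): index of the first occurrence of c in s at position ≥ pos, as an Option (none = -1).
def pvFindIdx (c : Char) : List Char → Option Nat
  | [] => none
  | x :: xs => if x = c then some 0 else (pvFindIdx c xs).map (· + 1)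

def pvFind (s : List Char) (c : Char) (pos : Nat) : Option Nat :=
  (pvFindIdx c (s.drop pos)).map (· + pos)

-- the inner 'for ch in seq' loop: thread the cursor through the pattern, none = early return
def pvMatchSeq (s : List Char) : List Char → Nat → Option Nat
  | [], pos => some pos
  | c :: rest, pos =>
    match pvFind s c pos with
    | none => none
    | some i => pvMatchSeq s rest (i + 1)

theorem pvFindIdx_lt (c : Char) : ∀ (l : List Char) (k : Nat), pvFindIdx c l = some k → k < l.length := by
  intro l
  induction l with
  | nil => intro k h; simp [pvFindIdx] at h
  | cons x xs ih =>
    intro k h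
    by_cases hx : x = c
    · simp [pvFindIdx, hx] at h
      simp; omega
    · simp [pvFindIdx, hx] at h
      obtain ⟨m, hm, rfl⟩ := h
      have := ih m hm
      simp; omega

theorem pvFind_some_bounds {s : List Char} {c : Char} {pos i : Nat}
    (h : pvFind s c pos = some i) : pos ≤ i ∧ i < s.length := by
  unfold pvFind at h
  obtain ⟨k, hk, rfl⟩ := Option.map_eq_some_iff.mp h
  have hlen := pvFindIdx_lt c _ _ hk
  simp at hlen
  omega

theorem pvMatchSeq_some_bounds {s : List Char} :
    ∀ {rest : List Char} {pos p : Nat}, pvMatchSeq s rest pos = some p →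
      pos ≤ p ∧ p ≤ s.length ∨ rest = [] ∧ p = pos := by
  intro rest
  induction rest with
  | nil => intro pos p h; simp [pvMatchSeq] at h; right; exact ⟨rfl, h.symm⟩
  | cons c r ih =>
    intro pos p h
    unfold pvMatchSeq at h
    cases hf : pvFind s c pos with
    | none => rw [hf] at h; simp at h
    | some i =>
      rw [hf] at h
      have hb := pvFind_some_bounds hf
      left
      rcases ih h with ⟨h1, h2⟩ | ⟨_, rfl⟩
      · omega
      · omega

-- the outer 'while True' loop; each full match advances the cursor, so it terminates
def pvOuter (s : List Char) (c : Char) (rest : List Char) (pos : Nat) (count : Int) : Int :=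
  match h : pvMatchSeq s (c :: rest) pos with
  | none => count
  | some p => pvOuter s c rest p (count + 1)
termination_by s.length + 1 - pos
decreasing_by
  have := pvMatchSeq_some_bounds h
  simp at this
  unfold pvMatchSeq at h
  cases hf : pvFind s c pos with
  | none => rw [hf] at h; simp at h
  | some i =>
    rw [hf] at h
    have hb := pvFind_some_bounds hf
    rcases pvMatchSeq_some_bounds h with ⟨h1, _⟩ | ⟨_, rfl⟩ <;> omega

def find_subsequence_count_alt (s : String) (seq : String) : Int :=
  match seq.toList with
  | [] => 0
  | c :: rest => pvOuter s.toList c rest 0 0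

-- ===== PRECONDITION & SPEC =====
def Spec_find_subsequence_count (s : String) (seq : String) (out : Int) : Prop := out = find_subsequence_count_alt s seq
instance (s : String) (seq : String) (out : Int) : Decidable (Spec_find_subsequence_count s seq out) := by unfold Spec_find_subsequence_count; infer_instance

-- ===== CLAIM (what is proved, stated in full; the proofs are below) =====
def Claim_equal_find_subsequence_count : Prop := ∀ (s : String) (seq : String), Dom_find_subsequence_count s seq → Spec_find_subsequence_count s seq (find_subsequence_count s seq)

-- ===== LEMMAS AND PROOFS =====

theorem pvOuter_eq (s : List Char) (c : Char) (rest : List Char) (pos : Nat) (count : Int) :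
    pvOuter s c rest pos count =
      match pvMatchSeq s (c :: rest) pos with
      | none => count
      | some p => pvOuter s c rest p (count + 1) := by
  rw [pvOuter.eq_def]
  split <;> rename_i h <;> rw [h]

theorem pvFind_here {s : List Char} {pos : Nat} {c : Char} {s' : List Char}
    (hd : s.drop pos = c :: s') : pvFind s c pos = some pos := by
  simp [pvFind, hd, pvFindIdx]

theorem pvFind_skip {s : List Char} {pos : Nat} {c d : Char} {s' : List Char}
    (hd : s.drop pos = c :: s') (hne : c ≠ d) : pvFind s d pos = pvFind s d (pos + 1) := by
  have htail : s.drop (pos + 1) = s' := by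
    rw [← List.tail_drop, hd, List.tail_cons]
  simp [pvFind, hd, htail, pvFindIdx, hne, Option.map_map]
  rcases pvFindIdx d s' with _ | k <;> simp <;> omega

theorem pvFind_nil {s : List Char} {pos : Nat} {c : Char}
    (hd : s.drop pos = []) : pvFind s c pos = none := by
  simp [pvFind, hd, pvFindIdx]

-- Bridge invariant: A resumed with pattern suffix orig.drop j at the suffix s.drop pos equals
-- B's find-driven loop continued mid-match at pattern position j, cursor pos.
theorem pvGoA_bridge (orig : List Char) (c0 : Char) (rest0 : List Char)
    (horig : orig = c0 :: rest0) (s : List Char) :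
    ∀ pos : Nat, pos ≤ s.length → ∀ j : Nat, j < orig.length → ∀ count : Int,
      pvGoA orig (s.drop pos) (orig.drop j) count =
        (match pvMatchSeq s (orig.drop j) pos with
         | none => count
         | some p => pvOuter s c0 rest0 p (count + 1)) := by
  intro pos
  induction hn : s.length - pos using Nat.strong_induction_on generalizing pos with
  | _ n ih =>
  intro hpos j hj count
  rcases hdj : orig.drop j with _ | ⟨d, drest⟩
  · exfalso; have := List.drop_eq_nil_iff.mp hdj; omega
  rcases hsd : s.drop pos with _ | ⟨c, s'⟩
  · -- end of s: A returns count; pvFind fails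
    have hms : pvMatchSeq s (d :: drest) pos = none := by
      unfold pvMatchSeq; rw [pvFind_nil hsd]
    rw [hms]
    simp [pvGoA]
  · have hposlt : pos < s.length := by
      have hlen := congrArg List.length hsd
      simp at hlen
      omega
    have htail : s.drop (pos + 1) = s' := by
      rw [← List.tail_drop, hsd, List.tail_cons]
    have hd1 : orig.drop (j + 1) = drest := by
      rw [← List.tail_drop, hdj, List.tail_cons]
    by_cases hm : c = d
    · -- match: advance in pattern
      subst hm
      have hfind : pvFind s c pos = some pos := pvFind_here hsd
      have hstep : pvMatchSeq s (c :: drest) pos = pvMatchSeq s drest (pos + 1) := by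
        conv_lhs => rw [pvMatchSeq]
        rw [hfind]
      by_cases hend : j + 1 = orig.length
      · -- pattern completed
        have hdz : drest = [] := by
          rw [← hd1]; simp [hend]
        subst hdz
        have hms : pvMatchSeq s (c :: ([] : List Char)) pos = some (pos + 1) := by
          rw [hstep]; rfl
        rw [hms]
        show pvGoA orig (c :: s') [c] count = pvOuter s c0 rest0 (pos + 1) (count + 1)
        have hA : pvGoA orig (c :: s') [c] count = pvGoA orig s' orig (count + 1) := by
          simp [pvGoA]
        have hIH := ih (s.length - (pos + 1)) (by omega) (pos + 1) rfl (by omega) 0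
          (by rw [horig]; simp) (count + 1)
        simp only [List.drop_zero] at hIH
        rw [htail] at hIH
        rw [hA, hIH, horig, pvOuter_eq]
      · have hlt : j + 1 < orig.length := by omega
        have hdne : drest ≠ [] := by
          rw [← hd1]; simp [List.drop_eq_nil_iff]; omega
        have hA : pvGoA orig (c :: s') (c :: drest) count
            = pvGoA orig s' drest count := by
          simp [pvGoA, hdne]
        rw [hA, hstep]
        have hIH := ih (s.length - (pos + 1)) (by omega) (pos + 1) rfl (by omega) (j + 1) hlt count
        rw [htail, hd1] at hIH
        exact hIH
    · -- mismatch: skip this char of s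
      have hA : pvGoA orig (c :: s') (d :: drest) count
          = pvGoA orig s' (d :: drest) count := by
        have hmb : ¬ d = c := fun h => hm h.symm
        simp [pvGoA, hmb]
      have hstep : pvMatchSeq s (d :: drest) pos = pvMatchSeq s (d :: drest) (pos + 1) := by
        unfold pvMatchSeq; rw [pvFind_skip hsd hm]
      rw [hA, hstep]
      have hIH := ih (s.length - (pos + 1)) (by omega) (pos + 1) rfl (by omega) j hj count
      rw [htail, hdj] at hIH
      exact hIH

-- ===== VERDICT (by name: the statement is the Claim_ definition above) =====
theorem find_subsequence_count_spec : Claim_equal_find_subsequence_count := by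
  intro s seq _
  unfold Spec_find_subsequence_count find_subsequence_count find_subsequence_count_alt
  rcases hq : seq.toList with _ | ⟨c, rest⟩
  · simp
  · rw [if_neg (by simp)]
    have hb := pvGoA_bridge seq.toList c rest hq s.toList 0 (by omega) 0
      (by rw [hq]; simp) 0
    simp only [List.drop_zero] at hb
    rw [hq] at hb
    rw [hb]
    show _ = pvOuter s.toList c rest 0 0
    rw [pvOuter_eq]
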